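-- pv_equiv track=rewrite | github.com/rubycho/sched-tracer | kernel4_13_16/helper.py | is_status
-- ===== SOURCE A (Python) =====
-- def is_status(str):
--     if len(str) == 1:
--         return True
--
--     if len(str) < 1:
--         return False
--
--     strs = str.split("|")
--     if len(strs) < 1:
--         return False
--
--     for s in strs:
--         if len(s) != 1:
--             return False
--     return True
-- ===== SOURCE B (Python) =====
-- def is_status(str):
--     if len(str) == 1:
--         return True
--     if not str or str[0] == '|':
--         return False
--     expect_pipe = True
--     for c in str[1:]:
--         if expect_pipe != (c == '|'):
--             return False
--         expect_pipe = not expect_pipe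
--     return expect_pipe
-- ===== Notes on version B (the rewrite author's own statement) =====
-- stated objective: alternative
-- what changed: Replaced the split-on-separator pass plus a loop over the resulting parts with a single left-to-right state-machine scan (alternating expect-char/expect-separator) that never materialises the list of parts.
import Mathlib
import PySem

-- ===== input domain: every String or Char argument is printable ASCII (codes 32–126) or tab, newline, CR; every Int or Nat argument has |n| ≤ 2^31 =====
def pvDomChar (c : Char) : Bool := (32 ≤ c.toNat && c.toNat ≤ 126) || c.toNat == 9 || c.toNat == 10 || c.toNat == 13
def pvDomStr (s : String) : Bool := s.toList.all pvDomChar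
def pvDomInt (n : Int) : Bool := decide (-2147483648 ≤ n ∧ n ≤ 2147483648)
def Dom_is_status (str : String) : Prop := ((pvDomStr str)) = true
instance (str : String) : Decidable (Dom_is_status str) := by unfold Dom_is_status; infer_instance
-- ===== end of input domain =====

-- B changes the algorithm: one state-machine scan instead of split('|') and a loop over the parts (alternative, same cost).

-- ===== PORT A =====
-- the 'for s in strs: if len(s) != 1: return False / return True' loop
def is_status_checkParts : List String → Bool
  | [] => true
  | s :: rest => if PySem.Str.len s != 1 then false else is_status_checkParts rest

def is_status (str : String) : Bool :=
  if PySem.Str.len str == 1 then true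
  else if PySem.Str.len str < 1 then false
  else
    -- str.split("|"); the separator is the non-empty literal "|", so split? never returns none
    let strs := (PySem.Str.split? str "|").getD []
    if (strs.length : Int) < 1 then false
    else is_status_checkParts strs

-- ===== PORT B =====
-- the 'for c in str[1:]' loop with the expect_pipe flag (the early 'return False' stays a branch)
def is_status_altLoop : List Char → Bool → Bool
  | [], expect_pipe => expect_pipe
  | c :: rest, expect_pipe =>
      if expect_pipe != (c == '|') then false else is_status_altLoop rest (!expect_pipe)

def is_status_alt (str : String) : Bool :=
  if PySem.Str.len str == 1 then true
  else
    match str.toList with           -- 'not str or str[0] == "|"' via str[0] / str[1:]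
    | [] => false
    | c :: rest => if c == '|' then false else is_status_altLoop rest true

-- ===== PRECONDITION & SPEC =====
def Spec_is_status (str : String) (out : Bool) : Prop := out = is_status_alt str
instance (str : String) (out : Bool) : Decidable (Spec_is_status str out) := by unfold Spec_is_status; infer_instance

-- ===== CLAIM (what is proved, stated in full; the proofs are below) =====
def Claim_equal_is_status : Prop := ∀ (str : String), Dom_is_status str → Spec_is_status str (is_status str)

-- ===== LEMMAS AND PROOFS =====

-- proof-side mirror of splitting on a single '|' with an explicit current piece
def pvSps : List Char → List Char → List (List Char)
  | cur, [] => [cur]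
  | cur, c :: rest => if c = '|' then cur :: pvSps [] rest else pvSps (cur ++ [c]) rest

lemma pvGo_eq : ∀ (fuel : Nat) (l cur : List Char) (acc : List (List Char)), l.length < fuel →
    PySem.Chars.splitOn.go ['|'] fuel l cur acc = acc.reverse ++ pvSps cur.reverse l := by
  intro fuel
  induction fuel with
  | zero => intro l cur acc h; omega
  | succ f ih =>
    intro l cur acc h
    cases l with
    | nil => simp [PySem.Chars.splitOn.go, pvSps]
    | cons c rest =>
      by_cases hc : c = '|'
      · subst hc
        rw [show PySem.Chars.splitOn.go ['|'] (f+1) ('|' :: rest) cur acc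
              = PySem.Chars.splitOn.go ['|'] f rest [] (cur.reverse :: acc) by
            simp [PySem.Chars.splitOn.go, List.isPrefixOf]]
        rw [ih rest [] (cur.reverse :: acc) (by simpa using Nat.lt_of_succ_lt_succ h)]
        simp [pvSps]
      · rw [show PySem.Chars.splitOn.go ['|'] (f+1) (c :: rest) cur acc
              = PySem.Chars.splitOn.go ['|'] f rest (c :: cur) acc by
            simp [PySem.Chars.splitOn.go, List.isPrefixOf]
            exact fun h => absurd h.symm hc]
        rw [ih rest (c :: cur) acc (by simpa using Nat.lt_of_succ_lt_succ h)]
        simp [pvSps, hc]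

lemma pvSplitOn_eq (cs : List Char) : PySem.Chars.splitOn cs ['|'] = pvSps [] cs := by
  unfold PySem.Chars.splitOn
  rw [pvGo_eq (cs.length + 1) cs [] [] (by omega)]
  rfl

lemma pvSps_ne_nil (cur cs : List Char) : pvSps cur cs ≠ [] := by
  induction cs generalizing cur with
  | nil => simp [pvSps]
  | cons c rest ih => by_cases hc : c = '|' <;> simp [pvSps, hc, ih]

lemma pvSps_long (cs : List Char) : ∀ cur : List Char, 2 ≤ cur.length →
    (pvSps cur cs).all (fun p => decide (p.length = 1)) = false := by
  induction cs with
  | nil => intro cur h; simp [pvSps]; omega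
  | cons c rest ih =>
    intro cur h
    by_cases hc : c = '|'
    · simp [pvSps, hc]; intro hlen; omega
    · simp only [pvSps, if_neg hc]
      exact ih _ (by simp; omega)

lemma pvKey : ∀ (n : Nat) (cs : List Char), cs.length ≤ n →
    ((pvSps [] cs).all (fun p => decide (p.length = 1)) = is_status_altLoop cs false) ∧
    (∀ c : Char, ¬ c = '|' →
      (pvSps [c] cs).all (fun p => decide (p.length = 1)) = is_status_altLoop cs true) := by
  intro n
  induction n with
  | zero =>
    intro cs h
    have : cs = [] := List.eq_nil_of_length_eq_zero (Nat.le_zero.mp h)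
    subst this
    exact ⟨by simp [pvSps, is_status_altLoop], fun c hc => by simp [pvSps, is_status_altLoop]⟩
  | succ n ih =>
    intro cs h
    cases cs with
    | nil =>
      exact ⟨by simp [pvSps, is_status_altLoop], fun c hc => by simp [pvSps, is_status_altLoop]⟩
    | cons c rest =>
      have hr : rest.length ≤ n := by simpa using Nat.le_of_succ_le_succ h
      constructor
      · by_cases hc : c = '|'
        · subst hc; simp [pvSps, is_status_altLoop]
        · simp only [pvSps, if_neg hc, List.nil_append]
          rw [(ih rest hr).2 c hc]
          simp [is_status_altLoop, hc]
      · intro c0 hc0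
        by_cases hc : c = '|'
        · subst hc
          rw [show pvSps [c0] ('|' :: rest) = [c0] :: pvSps [] rest from by simp [pvSps]]
          rw [List.all_cons, (ih rest hr).1]
          simp [is_status_altLoop]
        · simp only [pvSps, if_neg hc, List.singleton_append]
          rw [pvSps_long rest [c0, c] (by simp)]
          simp [is_status_altLoop, hc]

lemma pvCheckParts_eq (strs : List String) :
    is_status_checkParts strs
      = (strs.map String.toList).all (fun p => decide (p.length = 1)) := by
  induction strs with
  | nil => simp [is_status_checkParts]
  | cons s rest ih =>
    simp only [is_status_checkParts, List.map_cons, List.all_cons, ih]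
    have hlen : PySem.Str.len s = (s.toList.length : Int) := by
      simp [PySem.Str.len_eq, String.length_toList]
    by_cases hl : s.toList.length = 1
    · simp [hl]
    · simp

lemma pvStrs_map (str : String) :
    ((PySem.Str.split? str "|").getD []).map String.toList = pvSps [] str.toList := by
  have h := PySem.Str.split?_map str "|"
  have hsome : PySem.Chars.split? str.toList ("|" : String).toList
      = some (PySem.Chars.splitOn str.toList ['|']) := by
    simp [PySem.Chars.split?]
  rw [hsome] at h
  cases hs : PySem.Str.split? str "|" with
  | none => rw [hs] at h; simp at h
  | some strs =>
    rw [hs] at h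
    simp only [Option.map_some] at h
    simpa [pvSplitOn_eq] using Option.some.inj h

-- ===== VERDICT (by name: the statement is the Claim_ definition above) =====
theorem is_status_spec : Claim_equal_is_status := by
  intro str _
  unfold Spec_is_status is_status is_status_alt
  by_cases h1 : (PySem.Str.len str == 1) = true
  · rw [if_pos h1, if_pos h1]
  · rw [if_neg h1, if_neg h1]
    have hlen : PySem.Str.len str = (str.toList.length : Int) := by
      simp [PySem.Str.len_eq, String.length_toList]
    cases hcs : str.toList with
    | nil =>
      have h0 : PySem.Str.len str < 1 := by rw [hlen, hcs]; simp
      rw [if_pos h0]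
    | cons c rest =>
      have h2 : ¬ PySem.Str.len str < 1 := by rw [hlen, hcs]; simp
      rw [if_neg h2]
      have hne : ¬ ((((PySem.Str.split? str "|").getD []).length : Int) < 1) := by
        have hmap := pvStrs_map str
        have hnn : ((PySem.Str.split? str "|").getD []) ≠ [] := by
          intro hnil
          rw [hnil] at hmap
          exact pvSps_ne_nil [] str.toList hmap.symm
        have := List.length_pos_of_ne_nil hnn
        omega
      show (if ((((PySem.Str.split? str "|").getD []).length : Int) < 1) then false
              else is_status_checkParts ((PySem.Str.split? str "|").getD []))
            = (if c == '|' then false else is_status_altLoop rest true)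
      rw [if_neg hne, pvCheckParts_eq, pvStrs_map, hcs]
      by_cases hc : c = '|'
      · subst hc
        simp [pvSps]
      · have hcb : (c == '|') = false := by simp [hc]
        rw [show (if c == '|' then false else is_status_altLoop rest true)
              = is_status_altLoop rest true by rw [hcb]; rfl]
        simp only [pvSps, if_neg hc, List.nil_append]
        exact (pvKey rest.length rest le_rfl).2 c hc
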